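-- pv_equiv track=rewrite | github.com/hokoro/Algorithm | 문자열/babbling2.py | solution
-- ===== SOURCE A (Python) =====
-- def solution(babbling):
--     answer = 0
--     babbling_list = ["aya", "ye", "woo", "ma"]
--     bab_list = []
--     for babb in babbling:
--         bab_list = []
--         if babb in babbling_list:
--             answer += 1
--             continue
--         else:
--             bab_str = ''
--             for bab in babb:
--                 bab_str += bab
--                 if bab_str in babbling_list and bab_str not in bab_list:
--                     bab_list.append(bab_str)
--                     bab_str = ''
--
--             if "".join(bab_list) == babb:
--                 answer += 1
--
--     return answer
-- ===== SOURCE B (Python) =====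
-- SOUNDS = ("aya", "ye", "woo", "ma")
--
--
-- def _tokens(w):
--     """Greedy front-to-back tokenization into allowed sounds (they are
--     mutually prefix-free, so the partition is unique); None if impossible."""
--     toks = []
--     i = 0
--     while i < len(w):
--         for s in SOUNDS:
--             if w.startswith(s, i):
--                 toks.append(s)
--                 i += len(s)
--                 break
--         else:
--             return None
--     return toks
--
--
-- def _ok(w):
--     t = _tokens(w)
--     return 1 if t is not None and len(set(t)) == len(t) else 0
--
--
-- def solution(babbling):
--     return sum(_ok(w) for w in babbling)
-- ===== Notes on version B (the rewrite author's own statement) =====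
-- stated objective: idiomatic
-- what changed: Replaces A's per-character string accumulation with membership tests and a join-back equality check by a direct prefix-free greedy tokenizer (startswith per allowed sound) plus a set-based distinctness check, summed over the words.
import Mathlib
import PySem

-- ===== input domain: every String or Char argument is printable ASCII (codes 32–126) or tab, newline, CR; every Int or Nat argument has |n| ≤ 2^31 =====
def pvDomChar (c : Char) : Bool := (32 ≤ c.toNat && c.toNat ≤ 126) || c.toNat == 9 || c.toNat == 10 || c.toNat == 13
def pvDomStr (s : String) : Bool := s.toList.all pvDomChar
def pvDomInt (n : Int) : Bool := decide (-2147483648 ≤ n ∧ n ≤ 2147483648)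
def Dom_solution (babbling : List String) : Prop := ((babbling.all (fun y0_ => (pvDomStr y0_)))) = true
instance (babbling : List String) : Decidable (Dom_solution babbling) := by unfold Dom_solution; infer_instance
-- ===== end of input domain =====

-- B replaces A's per-character accumulation with a direct greedy prefix tokenizer
-- plus a set-based distinctness check (idiomatic; same cost).

-- Strings are handled as their character lists (String.toList), exact for ==, 'in', += and ''.join.

-- ===== PORT A =====
-- the literal list ["aya", "ye", "woo", "ma"] as character lists
def soundsL : List (List Char) := [['a','y','a'], ['y','e'], ['w','o','o'], ['m','a']]

-- A's inner 'for bab in babb' loop: state (bab_str, bab_list)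
def runA : List Char → List Char → List (List Char) → List Char × List (List Char)
  | [], str, lst => (str, lst)
  | c :: r, str, lst =>
    if (str ++ [c]) ∈ soundsL ∧ (str ++ [c]) ∉ lst then
      runA r [] (lst ++ [str ++ [c]])
    else
      runA r (str ++ [c]) lst

def solution (babbling : List String) : Int :=
  babbling.foldl
    (fun answer babb =>
      if babb.toList ∈ soundsL then answer + 1
      else if (runA babb.toList [] []).2.flatten = babb.toList then answer + 1
      else answer)
    0

-- ===== PORT B =====
-- Source B's _tokens: greedy startswith-based tokenization (sounds tried in order; patterns are disjoint)
def tokB : List Char → Option (List (List Char))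
  | [] => some []
  | 'a' :: 'y' :: 'a' :: r => (tokB r).map (fun t => ['a','y','a'] :: t)
  | 'y' :: 'e' :: r => (tokB r).map (fun t => ['y','e'] :: t)
  | 'w' :: 'o' :: 'o' :: r => (tokB r).map (fun t => ['w','o','o'] :: t)
  | 'm' :: 'a' :: r => (tokB r).map (fun t => ['m','a'] :: t)
  | _ => none

-- Source B's _ok
def okB (w : List Char) : Int :=
  match tokB w with
  | some t => if (PySem.Set.ofList t).length = t.length then 1 else 0
  | none => 0

def solution_alt (babbling : List String) : Int :=
  (babbling.map (fun w => okB w.toList)).sum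

-- ===== PRECONDITION & SPEC =====
def Spec_solution (babbling : List String) (out : Int) : Prop := out = solution_alt babbling
instance (babbling : List String) (out : Int) : Decidable (Spec_solution babbling out) := by unfold Spec_solution; infer_instance

-- ===== CLAIM (what is proved, stated in full; the proofs are below) =====
def Claim_equal_solution : Prop := ∀ (babbling : List String), Dom_solution babbling → Spec_solution babbling (solution babbling)

-- ===== LEMMAS AND PROOFS =====

-- invariant: the consumed input is exactly flatten(bab_list) ++ bab_str
theorem runA_flatten : ∀ (w str : List Char) (lst : List (List Char)),
    (runA w str lst).2.flatten ++ (runA w str lst).1 = lst.flatten ++ str ++ w := by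
  intro w
  induction w with
  | nil => intro str lst; simp [runA]
  | cons c r ih =>
    intro str lst
    rw [runA]
    split
    · rw [ih]; simp
    · rw [ih]; simp

-- the allowed sounds are mutually prefix-free
theorem sounds_prefix_free (p q : List Char) (hp : p ∈ soundsL) (hq : q ∈ soundsL)
    (h : p <+: q) : p = q := by
  simp only [soundsL, List.mem_cons, List.not_mem_nil, or_false] at hp hq
  rcases hp with rfl | rfl | rfl | rfl <;> rcases hq with rfl | rfl | rfl | rfl <;>
    revert h <;> decide

-- if every sound reachable by accumulation is already used, nothing ever resets
theorem runA_no_reset : ∀ (w str : List Char) (lst : List (List Char)),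
    (∀ p, p <+: w → (str ++ p) ∈ soundsL → (str ++ p) ∈ lst) →
    runA w str lst = (str ++ w, lst) := by
  intro w
  induction w with
  | nil => intro str lst _; simp [runA]
  | cons c r ih =>
    intro str lst h
    rw [runA]
    have hc : ¬((str ++ [c]) ∈ soundsL ∧ (str ++ [c]) ∉ lst) := by
      rintro ⟨hs, hn⟩
      exact hn (h [c] ⟨r, rfl⟩ hs)
    rw [if_neg hc, ih (str ++ [c]) lst]
    · simp
    · intro p hp hs
      have := h (c :: p) (by obtain ⟨t, ht⟩ := hp; exact ⟨t, by simp [← ht]⟩) (by simpa using hs)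
      simpa using this

-- per-sound reset steps
theorem runA_aya (r : List Char) (lst : List (List Char)) (h : ['a','y','a'] ∉ lst) :
    runA ('a'::'y'::'a'::r) [] lst = runA r [] (lst ++ [['a','y','a']]) := by
  simp [runA, soundsL, h]

theorem runA_ye (r : List Char) (lst : List (List Char)) (h : ['y','e'] ∉ lst) :
    runA ('y'::'e'::r) [] lst = runA r [] (lst ++ [['y','e']]) := by
  simp [runA, soundsL, h]

theorem runA_woo (r : List Char) (lst : List (List Char)) (h : ['w','o','o'] ∉ lst) :
    runA ('w'::'o'::'o'::r) [] lst = runA r [] (lst ++ [['w','o','o']]) := by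
  simp [runA, soundsL, h]

theorem runA_ma (r : List Char) (lst : List (List Char)) (h : ['m','a'] ∉ lst) :
    runA ('m'::'a'::r) [] lst = runA r [] (lst ++ [['m','a']]) := by
  simp [runA, soundsL, h]

-- if a used sound heads the word, A gets stuck
theorem runA_dup_stuck (w s : List Char) (lst : List (List Char))
    (hs : s ∈ soundsL) (hpre : s <+: w) (hd : s ∈ lst) :
    (runA w [] lst).1 = w := by
  have hres := runA_no_reset w [] lst (by
    intro p hp hps
    simp only [List.nil_append] at hps ⊢
    rcases Nat.le_total p.length s.length with hle | hle
    · rwa [sounds_prefix_free p s hps hs (List.prefix_of_prefix_length_le hp hpre hle)]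
    · rwa [← sounds_prefix_free s p hs hps (List.prefix_of_prefix_length_le hpre hp hle)])
  rw [hres]
  simp

-- tokB reduction equations
theorem tokB_nil : tokB [] = some [] := by simp [tokB]

theorem tokB_aya (r : List Char) :
    tokB ('a'::'y'::'a'::r) = (tokB r).map (fun t => ['a','y','a'] :: t) := by simp [tokB]

theorem tokB_ye (r : List Char) :
    tokB ('y'::'e'::r) = (tokB r).map (fun t => ['y','e'] :: t) := by simp [tokB]

theorem tokB_woo (r : List Char) :
    tokB ('w'::'o'::'o'::r) = (tokB r).map (fun t => ['w','o','o'] :: t) := by simp [tokB]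

theorem tokB_ma (r : List Char) :
    tokB ('m'::'a'::r) = (tokB r).map (fun t => ['m','a'] :: t) := by simp [tokB]

-- tokB on a nonempty word matching none of the sounds
theorem tokB_none (c : Char) (r : List Char)
    (h1 : ¬ ['a','y','a'] <+: (c :: r)) (h2 : ¬ ['y','e'] <+: (c :: r))
    (h3 : ¬ ['w','o','o'] <+: (c :: r)) (h4 : ¬ ['m','a'] <+: (c :: r)) :
    tokB (c :: r) = none := by
  rw [tokB.eq_def]
  split
  · simp_all
  · exact absurd (by rename_i h heq; rw [heq]; exact ⟨h, rfl⟩) h1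
  · exact absurd (by rename_i h heq; rw [heq]; exact ⟨h, rfl⟩) h2
  · exact absurd (by rename_i h heq; rw [heq]; exact ⟨h, rfl⟩) h3
  · exact absurd (by rename_i h heq; rw [heq]; exact ⟨h, rfl⟩) h4
  · rfl

-- PySem.Set.add computations
theorem add_of_mem (s : PySem.Set (List Char)) (a : List Char) (h : a ∈ s) :
    PySem.Set.add s a = s := by
  simp [PySem.Set.add, PySem.Set.contains, h]

theorem add_of_not_mem (s : PySem.Set (List Char)) (a : List Char) (h : a ∉ s) :
    PySem.Set.add s a = s ++ [a] := by
  simp [PySem.Set.add, PySem.Set.contains, h]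

theorem foldl_add_le : ∀ (t : List (List Char)) (s : PySem.Set (List Char)),
    (t.foldl PySem.Set.add s).length ≤ s.length + t.length := by
  intro t
  induction t with
  | nil => intro s; simp
  | cons a t ih =>
    intro s
    rw [List.foldl_cons]
    by_cases h : a ∈ s
    · rw [add_of_mem s a h]
      have := ih s
      simp only [List.length_cons]
      omega
    · rw [add_of_not_mem s a h]
      have := ih (s ++ [a])
      simp only [List.length_append, List.length_cons, List.length_nil] at this ⊢
      omega

theorem foldl_add_eq_iff : ∀ (t : List (List Char)) (s : PySem.Set (List Char)),
    ((t.foldl PySem.Set.add s).length = s.length + t.length) ↔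
      (t.Nodup ∧ ∀ x ∈ t, x ∉ s) := by
  intro t
  induction t with
  | nil => intro s; simp
  | cons a t ih =>
    intro s
    rw [List.foldl_cons]
    by_cases h : a ∈ s
    · rw [add_of_mem s a h]
      have hle := foldl_add_le t s
      constructor
      · intro he
        exfalso
        simp only [List.length_cons] at he
        omega
      · rintro ⟨-, hx⟩
        exact absurd h (hx a List.mem_cons_self)
    · rw [add_of_not_mem s a h]
      constructor
      · intro he
        have he' : (t.foldl PySem.Set.add (s ++ [a])).length = (s ++ [a]).length + t.length := by
          simp only [List.length_append, List.length_singleton]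
          simp only [List.length_cons] at he
          omega
        obtain ⟨hnd, hx⟩ := (ih (s ++ [a])).mp he'
        refine ⟨List.nodup_cons.mpr ⟨fun hat => (hx a hat) (by simp), hnd⟩, ?_⟩
        intro x hx'
        rcases List.mem_cons.mp hx' with rfl | hx''
        · exact h
        · exact fun hxs => (hx x hx'') (by simp [hxs])
      · rintro ⟨hnd, hx⟩
        obtain ⟨hat, hndt⟩ := List.nodup_cons.mp hnd
        have he' : (t.foldl PySem.Set.add (s ++ [a])).length = (s ++ [a]).length + t.length := by
          refine (ih (s ++ [a])).mpr ⟨hndt, ?_⟩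
          intro x hxt
          simp only [List.mem_append, List.mem_singleton]
          rintro (hxs | rfl)
          · exact hx x (List.mem_cons_of_mem a hxt) hxs
          · exact hat hxt
        simp only [List.length_append, List.length_singleton] at he'
        simp only [List.length_cons]
        omega

-- set(t) has as many elements as t iff t has no duplicates
theorem ofList_length_eq_iff (t : List (List Char)) :
    (PySem.Set.ofList t).length = t.length ↔ t.Nodup := by
  rw [PySem.Set.ofList_eq_foldl]
  have h := foldl_add_eq_iff t []
  simpa using h

-- MAIN: A's inner loop ends with empty bab_str iff B tokenizes w with tokens disjoint from lst
theorem main_iff : ∀ (n : Nat) (w : List Char), w.length ≤ n →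
    ∀ (lst : List (List Char)), lst.Nodup →
    ((runA w [] lst).1 = [] ↔ ∃ t, tokB w = some t ∧ (lst ++ t).Nodup) := by
  intro n
  induction n with
  | zero =>
    intro w hw lst hl
    cases w with
    | nil => simp [runA, tokB_nil, hl]
    | cons c r => simp at hw
  | succ n ih =>
    intro w hw lst hl
    cases w with
    | nil => simp [runA, tokB_nil, hl]
    | cons c r =>
      by_cases h1 : ['a','y','a'] <+: (c :: r)
      · obtain ⟨r1, hr⟩ := h1
        simp only [List.cons_append, List.nil_append] at hr
        injection hr with hc hr'
        subst hc; subst hr'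
        have hw' : r1.length ≤ n := by simp at hw; omega
        by_cases hd : ['a','y','a'] ∈ lst
        · constructor
          · intro hrun
            have := runA_dup_stuck ('a'::'y'::'a'::r1) ['a','y','a'] lst
              (by simp [soundsL]) ⟨r1, rfl⟩ hd
            rw [hrun] at this
            exact absurd this.symm (by simp)
          · rintro ⟨t, ht, hnd⟩
            rw [tokB_aya] at ht
            obtain ⟨t', ht', rfl⟩ := Option.map_eq_some_iff.mp ht
            exact (List.disjoint_of_nodup_append hnd hd List.mem_cons_self).elim
        · rw [runA_aya r1 lst hd, tokB_aya]
          have hl' : (lst ++ [['a','y','a']]).Nodup := by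
            simp [List.nodup_append, hl]
            intro a ha heq
            exact hd (heq ▸ ha)
          rw [ih r1 hw' (lst ++ [['a','y','a']]) hl']
          constructor
          · rintro ⟨t, ht, hnd⟩
            refine ⟨['a','y','a'] :: t, by rw [ht]; rfl, ?_⟩
            rw [List.append_assoc] at hnd
            simpa using hnd
          · rintro ⟨t, ht, hnd⟩
            obtain ⟨t', ht', rfl⟩ := Option.map_eq_some_iff.mp ht
            refine ⟨t', ht', ?_⟩
            rw [List.append_assoc]
            simpa using hnd
      by_cases h2 : ['y','e'] <+: (c :: r)
      · obtain ⟨r1, hr⟩ := h2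
        simp only [List.cons_append, List.nil_append] at hr
        injection hr with hc hr'
        subst hc; subst hr'
        have hw' : r1.length ≤ n := by simp at hw; omega
        by_cases hd : ['y','e'] ∈ lst
        · constructor
          · intro hrun
            have := runA_dup_stuck ('y'::'e'::r1) ['y','e'] lst
              (by simp [soundsL]) ⟨r1, rfl⟩ hd
            rw [hrun] at this
            exact absurd this.symm (by simp)
          · rintro ⟨t, ht, hnd⟩
            rw [tokB_ye] at ht
            obtain ⟨t', ht', rfl⟩ := Option.map_eq_some_iff.mp ht
            exact (List.disjoint_of_nodup_append hnd hd List.mem_cons_self).elim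
        · rw [runA_ye r1 lst hd, tokB_ye]
          have hl' : (lst ++ [['y','e']]).Nodup := by
            simp [List.nodup_append, hl]
            intro a ha heq
            exact hd (heq ▸ ha)
          rw [ih r1 hw' (lst ++ [['y','e']]) hl']
          constructor
          · rintro ⟨t, ht, hnd⟩
            refine ⟨['y','e'] :: t, by rw [ht]; rfl, ?_⟩
            rw [List.append_assoc] at hnd
            simpa using hnd
          · rintro ⟨t, ht, hnd⟩
            obtain ⟨t', ht', rfl⟩ := Option.map_eq_some_iff.mp ht
            refine ⟨t', ht', ?_⟩
            rw [List.append_assoc]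
            simpa using hnd
      by_cases h3 : ['w','o','o'] <+: (c :: r)
      · obtain ⟨r1, hr⟩ := h3
        simp only [List.cons_append, List.nil_append] at hr
        injection hr with hc hr'
        subst hc; subst hr'
        have hw' : r1.length ≤ n := by simp at hw; omega
        by_cases hd : ['w','o','o'] ∈ lst
        · constructor
          · intro hrun
            have := runA_dup_stuck ('w'::'o'::'o'::r1) ['w','o','o'] lst
              (by simp [soundsL]) ⟨r1, rfl⟩ hd
            rw [hrun] at this
            exact absurd this.symm (by simp)
          · rintro ⟨t, ht, hnd⟩
            rw [tokB_woo] at ht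
            obtain ⟨t', ht', rfl⟩ := Option.map_eq_some_iff.mp ht
            exact (List.disjoint_of_nodup_append hnd hd List.mem_cons_self).elim
        · rw [runA_woo r1 lst hd, tokB_woo]
          have hl' : (lst ++ [['w','o','o']]).Nodup := by
            simp [List.nodup_append, hl]
            intro a ha heq
            exact hd (heq ▸ ha)
          rw [ih r1 hw' (lst ++ [['w','o','o']]) hl']
          constructor
          · rintro ⟨t, ht, hnd⟩
            refine ⟨['w','o','o'] :: t, by rw [ht]; rfl, ?_⟩
            rw [List.append_assoc] at hnd
            simpa using hnd
          · rintro ⟨t, ht, hnd⟩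
            obtain ⟨t', ht', rfl⟩ := Option.map_eq_some_iff.mp ht
            refine ⟨t', ht', ?_⟩
            rw [List.append_assoc]
            simpa using hnd
      by_cases h4 : ['m','a'] <+: (c :: r)
      · obtain ⟨r1, hr⟩ := h4
        simp only [List.cons_append, List.nil_append] at hr
        injection hr with hc hr'
        subst hc; subst hr'
        have hw' : r1.length ≤ n := by simp at hw; omega
        by_cases hd : ['m','a'] ∈ lst
        · constructor
          · intro hrun
            have := runA_dup_stuck ('m'::'a'::r1) ['m','a'] lst
              (by simp [soundsL]) ⟨r1, rfl⟩ hd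
            rw [hrun] at this
            exact absurd this.symm (by simp)
          · rintro ⟨t, ht, hnd⟩
            rw [tokB_ma] at ht
            obtain ⟨t', ht', rfl⟩ := Option.map_eq_some_iff.mp ht
            exact (List.disjoint_of_nodup_append hnd hd List.mem_cons_self).elim
        · rw [runA_ma r1 lst hd, tokB_ma]
          have hl' : (lst ++ [['m','a']]).Nodup := by
            simp [List.nodup_append, hl]
            intro a ha heq
            exact hd (heq ▸ ha)
          rw [ih r1 hw' (lst ++ [['m','a']]) hl']
          constructor
          · rintro ⟨t, ht, hnd⟩
            refine ⟨['m','a'] :: t, by rw [ht]; rfl, ?_⟩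
            rw [List.append_assoc] at hnd
            simpa using hnd
          · rintro ⟨t, ht, hnd⟩
            obtain ⟨t', ht', rfl⟩ := Option.map_eq_some_iff.mp ht
            refine ⟨t', ht', ?_⟩
            rw [List.append_assoc]
            simpa using hnd
      -- no sound is a prefix: A never resets and B fails
      have hnone := tokB_none c r h1 h2 h3 h4
      have hstuck : runA (c :: r) [] lst = (c :: r, lst) :=
        runA_no_reset (c :: r) [] lst (by
          intro p hp hps
          simp only [List.nil_append] at hps ⊢
          exfalso
          simp only [soundsL, List.mem_cons, List.not_mem_nil, or_false] at hps
          rcases hps with rfl | rfl | rfl | rfl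
          · exact h1 hp
          · exact h2 hp
          · exact h3 hp
          · exact h4 hp)
      rw [hstuck, hnone]
      simp

-- a sound on its own parses trivially
theorem sound_run (w : List Char) (h : w ∈ soundsL) : (runA w [] []).1 = [] := by
  simp only [soundsL, List.mem_cons, List.not_mem_nil, or_false] at h
  rcases h with rfl | rfl | rfl | rfl <;> decide

-- flatten(bab_list) == babb iff the final bab_str is empty
theorem flat_iff (w : List Char) : (runA w [] []).2.flatten = w ↔ (runA w [] []).1 = [] := by
  have h := runA_flatten w [] []
  simp only [List.flatten_nil, List.nil_append] at h
  constructor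
  · intro he
    have hlen := congrArg List.length h
    simp only [List.length_append] at hlen
    have : (runA w [] []).2.flatten.length = w.length := by rw [he]
    have hz : (runA w [] []).1.length = 0 := by omega
    exact List.eq_nil_of_length_eq_zero hz
  · intro he
    rw [he] at h
    simpa using h

-- per-word agreement between A's loop body and B's okB
theorem perword (w : List Char) :
    (if w ∈ soundsL then (1 : Int)
     else if (runA w [] []).2.flatten = w then 1 else 0) = okB w := by
  have hm := main_iff w.length w le_rfl [] List.nodup_nil
  simp only [List.nil_append] at hm
  by_cases hs : w ∈ soundsL
  · rw [if_pos hs]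
    obtain ⟨t, ht, hnd⟩ := hm.1 (sound_run w hs)
    simp only [okB, ht]
    rw [if_pos ((ofList_length_eq_iff t).2 hnd)]
  · rw [if_neg hs]
    rcases htok : tokB w with _ | t
    · simp only [okB, htok]
      have hne : ¬(runA w [] []).1 = [] := by
        intro h
        obtain ⟨t, ht, _⟩ := hm.1 h
        rw [htok] at ht
        cases ht
      rw [if_neg (fun h => hne ((flat_iff w).1 h))]
    · simp only [okB, htok]
      by_cases hnd : t.Nodup
      · have hempty : (runA w [] []).1 = [] := hm.2 ⟨t, htok, hnd⟩
        rw [if_pos ((flat_iff w).2 hempty), if_pos ((ofList_length_eq_iff t).2 hnd)]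
      · have hne : ¬(runA w [] []).1 = [] := by
          intro h
          obtain ⟨t', ht', hnd'⟩ := hm.1 h
          rw [htok] at ht'
          injection ht' with ht'
          subst ht'
          exact hnd hnd'
        rw [if_neg (fun h => hne ((flat_iff w).1 h)),
          if_neg (fun h => hnd ((ofList_length_eq_iff t).1 h))]

-- fold with accumulator = accumulator + sum of per-word contributions
theorem fold_sum : ∀ (l : List String) (acc : Int),
    l.foldl
      (fun answer babb =>
        if babb.toList ∈ soundsL then answer + 1
        else if (runA babb.toList [] []).2.flatten = babb.toList then answer + 1
        else answer) acc
    = acc + (l.map (fun w => okB w.toList)).sum := by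
  intro l
  induction l with
  | nil => intro acc; simp
  | cons w l ih =>
    intro acc
    simp only [List.foldl_cons, List.map_cons, List.sum_cons]
    rw [ih, ← perword w.toList]
    split_ifs <;> ring

-- ===== VERDICT (by name: the statement is the Claim_ definition above) =====
theorem solution_spec : Claim_equal_solution := by
  intro babbling _
  unfold Spec_solution solution solution_alt
  rw [fold_sum]
  simp
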